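-- pv_equiv track=rewrite | github.com/stephen-huan/lectures | rmq/code/choosingk.py | full_table
-- ===== SOURCE A (Python) =====
-- def full_table(l: list) -> list:
--     """ Computes all possible ranges. """
--     n = len(l)
--     dp = [[] for i in range(n)]
--
--     for i in range(n):
--         dp[i].append(i)
--
--     for j in range(n):
--         for i in range(n - 1):
--             if i + j >= n or j >= len(dp[i + 1]):
--                 break
--             # dp[i].append(min(dp[i][j], dp[i + 1][j], key=lambda x: l[x]))
--             dp[i].append(dp[i][j] if l[dp[i][j]] <= l[dp[i + 1][j]] else dp[i + 1][j])
--
--     return dp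
-- ===== SOURCE B (Python) =====
-- def full_table(l: list) -> list:
--     """ Computes all possible ranges. """
--     n = len(l)
--     dp = []
--     for i in range(n):
--         row = []
--         best = i
--         for k in range(i, n):
--             if l[k] < l[best]:
--                 best = k
--             row.append(best)
--         dp.append(row)
--     return dp
-- ===== Notes on version B (the rewrite author's own statement) =====
-- stated objective: simpler
-- what changed: A fills the table column by column as a DP combining dp[i][j] with dp[i+1][j] (reading the previous column of the 2D predecessor table, with a break-based inner loop); B computes each row independently with a single running-minimum scalar, using strict '<' to keep the leftmost minimum.
import Mathlib
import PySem

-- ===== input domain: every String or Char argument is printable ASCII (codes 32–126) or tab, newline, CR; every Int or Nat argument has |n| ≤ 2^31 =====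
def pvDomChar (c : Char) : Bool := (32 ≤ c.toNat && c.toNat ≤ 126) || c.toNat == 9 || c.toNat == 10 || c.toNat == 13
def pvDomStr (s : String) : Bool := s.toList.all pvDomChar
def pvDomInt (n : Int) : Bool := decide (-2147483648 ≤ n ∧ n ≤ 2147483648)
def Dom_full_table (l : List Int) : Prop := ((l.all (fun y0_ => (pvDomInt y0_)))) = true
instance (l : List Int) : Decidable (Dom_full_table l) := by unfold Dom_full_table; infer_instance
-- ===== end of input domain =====

-- B replaces A's column-wise DP (combining dp[i][j] with dp[i+1][j]) by an independent
-- per-row running-minimum scan keeping a single scalar; objective: simpler.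

-- ===== PORT A =====
-- dp[i].append(dp[i][j] if l[dp[i][j]] <= l[dp[i+1][j]] else dp[i+1][j])
def combA (l : List Int) (a b : Int) : Int :=
  if PySem.List.pyGetD l a 0 ≤ PySem.List.pyGetD l b 0 then a else b

-- for i in range(n): dp[i].append(i)
def initA (dp : List (List Int)) : List Nat → List (List Int)
  | [] => dp
  | i :: is => initA (dp.set i ((dp.getD i []) ++ [(i : Int)])) is

-- inner 'for i in range(n - 1)' with its break
def innerA (l : List Int) (n j : Nat) (dp : List (List Int)) : List Nat → List (List Int)
  | [] => dp
  | i :: is =>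
    if n ≤ i + j ∨ (dp.getD (i+1) []).length ≤ j then dp
    else innerA l n j
      (dp.set i ((dp.getD i []) ++
        [combA l ((dp.getD i []).getD j 0) ((dp.getD (i+1) []).getD j 0)])) is

-- outer 'for j in range(n)'
def outerA (l : List Int) (n : Nat) (dp : List (List Int)) : List Nat → List (List Int)
  | [] => dp
  | j :: js => outerA l n (innerA l n j dp (List.range (n-1))) js

def full_table (l : List Int) : List (List Int) :=
  let n := l.length
  let dp0 := (List.range n).map (fun _ => ([] : List Int))
  let dp1 := initA dp0 (List.range n)
  outerA l n dp1 (List.range n)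

-- ===== PORT B =====
-- inner 'for k in range(i, n)': running leftmost-minimum index, append best each step
def altRow (l : List Int) (best : Int) : List Int → List Int
  | [] => []
  | k :: ks =>
    let best' := if PySem.List.pyGetD l k 0 < PySem.List.pyGetD l best 0 then k else best
    best' :: altRow l best' ks

def full_table_alt (l : List Int) : List (List Int) :=
  let n := l.length
  (List.range n).map (fun (i : Nat) => altRow l (i : Int) (PySem.List.pyRange (i : Int) (n : Int) 1))

-- ===== PRECONDITION & SPEC =====
def Spec_full_table (l : List Int) (out : List (List Int)) : Prop := out = full_table_alt l
instance (l : List Int) (out : List (List Int)) : Decidable (Spec_full_table l out) := by unfold Spec_full_table; infer_instance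

-- ===== CLAIM (what is proved, stated in full; the proofs are below) =====
def Claim_equal_full_table : Prop := ∀ (l : List Int), Dom_full_table l → Spec_full_table l (full_table l)

-- ===== LEMMAS AND PROOFS =====

-- the leftmost index of a minimum of l on the window [i, i+j]
def pvGet (l : List Int) (k : Nat) : Int := l.getD k 0

def pvM (l : List Int) (i : Nat) : Nat → Nat
  | 0 => i
  | j+1 => if pvGet l (i+j+1) < pvGet l (pvM l i j) then i+j+1 else pvM l i j

def pvRow (l : List Int) (i t : Nat) : List Int :=
  (List.range t).map (fun j => ((pvM l i j : Nat) : Int))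

lemma pvRow_succ (l : List Int) (i t : Nat) :
    pvRow l i (t+1) = pvRow l i t ++ [((pvM l i t : Nat) : Int)] := by
  simp [pvRow, List.range_succ]

lemma map_range_set {α : Type} (n c : Nat) (f : Nat → α) (v : α) :
    ((List.range n).map f).set c v
      = (List.range n).map (fun k => if k = c then v else f k) := by
  apply List.ext_getElem
  · simp
  · intro i h1 h2
    simp only [List.getElem_set, List.getElem_map, List.getElem_range]
    by_cases h : c = i
    · subst h; simp
    · rw [if_neg h, if_neg (fun hh => h hh.symm)]

-- A's combine of the two overlapping sub-window answers equals extending the window by one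
lemma comb_eq (l : List Int) : ∀ (j i : Nat),
    (if pvGet l (pvM l i j) ≤ pvGet l (pvM l (i+1) j) then pvM l i j else pvM l (i+1) j)
      = pvM l i (j+1) := by
  intro j
  induction j with
  | zero =>
      intro i
      simp only [pvM, Nat.add_zero]
      split_ifs <;> omega
  | succ j ih =>
      intro i
      have hx : i+(j+1)+1 = i+1+j+1 := by omega
      have hc := (ih i).symm
      have hd : pvM l (i+1) (j+1)
          = if pvGet l (i+1+j+1) < pvGet l (pvM l (i+1) j) then i+1+j+1 else pvM l (i+1) j := rfl
      have hr : pvM l i (j+1+1)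
          = if pvGet l (i+1+j+1) < pvGet l (pvM l i (j+1)) then i+1+j+1 else pvM l i (j+1) := by
        conv_lhs => rw [show pvM l i (j+1+1) = if pvGet l (i+(j+1)+1) < pvGet l (pvM l i (j+1)) then i+(j+1)+1 else pvM l i (j+1) from rfl]
        rw [hx]
      rw [hr, hd]
      by_cases h1 : pvGet l (pvM l i j) ≤ pvGet l (pvM l (i+1) j)
      · have hc' : pvM l i (j+1) = pvM l i j := by rw [hc, if_pos h1]
        rw [hc']
        by_cases h2 : pvGet l (i+1+j+1) < pvGet l (pvM l (i+1) j)
        · rw [if_pos h2]; split_ifs <;> omega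
        · rw [if_neg h2]; split_ifs <;> omega
      · have hc' : pvM l i (j+1) = pvM l (i+1) j := by rw [hc, if_neg h1]
        rw [hc']
        by_cases h2 : pvGet l (i+1+j+1) < pvGet l (pvM l (i+1) j)
        · rw [if_pos h2]; split_ifs <;> omega
        · rw [if_neg h2]; split_ifs <;> omega

-- ----- B characterisation -----
lemma altRow_go (l : List Int) : ∀ (t i j : Nat),
    altRow l ((pvM l i j : Nat) : Int)
        (PySem.List.pyRange ((i+j+1 : Nat) : Int) ((i+j+1+t : Nat) : Int) 1)
      = (List.range t).map (fun s => ((pvM l i (j+1+s) : Nat) : Int)) := by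
  intro t
  induction t with
  | zero =>
      intro i j
      rw [PySem.List.pyRange_one_eq_nil (by push_cast; omega)]
      simp [altRow]
  | succ t ih =>
      intro i j
      rw [PySem.List.pyRange_one_cons (by push_cast; omega)]
      simp only [altRow]
      have hb : (if PySem.List.pyGetD l ((i+j+1 : Nat) : Int) 0
              < PySem.List.pyGetD l ((pvM l i j : Nat) : Int) 0
            then ((i+j+1 : Nat) : Int) else ((pvM l i j : Nat) : Int))
          = ((pvM l i (j+1) : Nat) : Int) := by
        have g1 : PySem.List.pyGetD l ((i+j+1 : Nat) : Int) 0 = pvGet l (i+j+1) := by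
          rw [PySem.List.pyGetD_natCast]; rfl
        have g2 : PySem.List.pyGetD l ((pvM l i j : Nat) : Int) 0 = pvGet l (pvM l i j) := by
          rw [PySem.List.pyGetD_natCast]; rfl
        have hm : pvM l i (j+1) = if pvGet l (i+j+1) < pvGet l (pvM l i j) then i+j+1 else pvM l i j := rfl
        rw [g1, g2, hm]
        by_cases hcc : pvGet l (i+j+1) < pvGet l (pvM l i j)
        · rw [if_pos hcc, if_pos hcc]
        · rw [if_neg hcc, if_neg hcc]
      rw [hb]
      have harg : ((i+j+1 : Nat) : Int) + 1 = ((i+(j+1)+1 : Nat) : Int) := by push_cast; omega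
      have harg2 : ((i+j+1+(t+1) : Nat) : Int) = ((i+(j+1)+1+t : Nat) : Int) := by push_cast; omega
      rw [harg, harg2, ih i (j+1)]
      rw [List.range_succ_eq_map]
      simp only [List.map_cons, List.map_map]
      congr 1
      apply List.map_congr_left
      intro s _
      simp only [Function.comp_apply]
      congr 2
      omega

lemma altRow_full (l : List Int) (i n : Nat) (h : i < n) :
    altRow l (i : Int) (PySem.List.pyRange (i : Int) (n : Int) 1)
      = pvRow l i (n - i) := by
  rw [PySem.List.pyRange_one_cons (by omega)]
  simp only [altRow]
  have hb : (if PySem.List.pyGetD l (i : Int) 0 < PySem.List.pyGetD l (i : Int) 0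
        then (i : Int) else (i : Int)) = ((pvM l i 0 : Nat) : Int) := by
    simp [pvM]
  rw [hb]
  have harg : (i : Int) + 1 = ((i+0+1 : Nat) : Int) := by omega
  have harg2 : (n : Int) = ((i+0+1+(n - i - 1) : Nat) : Int) := by push_cast; omega
  rw [harg, harg2, altRow_go l (n - i - 1) i 0]
  have hsz : n - i = (n - i - 1) + 1 := by omega
  rw [pvRow, hsz, List.range_succ_eq_map]
  simp only [List.map_cons, List.map_map]
  congr 1
  apply List.map_congr_left
  intro s _
  simp only [Function.comp_apply]
  congr 2
  omega

-- ----- A characterisation -----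
-- dp state at the start of outer iteration j (rows hold answers for windows of size ≤ j+1)
def stateT (l : List Int) (n j : Nat) : List (List Int) :=
  (List.range n).map (fun i => pvRow l i (min (n-i) (j+1)))

-- mixed dp state inside the inner loop: rows below c already extended
def stateS (l : List Int) (n j c : Nat) : List (List Int) :=
  (List.range n).map (fun i => pvRow l i (min (n-i) (if i < c then j+2 else j+1)))

lemma stateS_ge (l : List Int) (n j c : Nat) (h : n-1-j ≤ c) :
    stateS l n j c = stateT l n (j+1) := by
  apply List.map_congr_left
  intro i hi
  simp only [List.mem_range] at hi
  congr 1
  split_ifs <;> omega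

lemma getD_stateS (l : List Int) (n j c i : Nat) (h : i < n) :
    (stateS l n j c).getD i []
      = pvRow l i (min (n-i) (if i < c then j+2 else j+1)) := by
  exact PySem.List.getD_map_range _ n i [] h

lemma getD_pvRow (l : List Int) (i t j : Nat) (h : j < t) :
    (pvRow l i t).getD j 0 = ((pvM l i j : Nat) : Int) := by
  exact PySem.List.getD_map_range _ t j 0 h

lemma comb_cast (l : List Int) (j c : Nat) :
    combA l ((pvM l c j : Nat) : Int) ((pvM l (c+1) j : Nat) : Int)
      = ((pvM l c (j+1) : Nat) : Int) := by
  unfold combA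
  have g1 : PySem.List.pyGetD l ((pvM l c j : Nat) : Int) 0 = pvGet l (pvM l c j) := by
    rw [PySem.List.pyGetD_natCast]; rfl
  have g2 : PySem.List.pyGetD l ((pvM l (c+1) j : Nat) : Int) 0 = pvGet l (pvM l (c+1) j) := by
    rw [PySem.List.pyGetD_natCast]; rfl
  rw [g1, g2, ← comb_eq l j c]
  by_cases hcc : pvGet l (pvM l c j) ≤ pvGet l (pvM l (c+1) j)
  · rw [if_pos hcc, if_pos hcc]
  · rw [if_neg hcc, if_neg hcc]

lemma inner_go (l : List Int) (n j : Nat) : ∀ (t c : Nat), c + t = n - 1 →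
    innerA l n j (stateS l n j c) (List.range' c t) = stateT l n (j+1) := by
  intro t
  induction t with
  | zero =>
      intro c hc
      simp only [List.range'_zero, innerA]
      exact stateS_ge l n j c (by omega)
  | succ t ih =>
      intro c hc
      have hcn : c + 1 < n := by omega
      rw [List.range'_succ]
      simp only [innerA]
      rw [getD_stateS l n j c (c+1) hcn, if_neg (by omega : ¬ c + 1 < c)]
      have hlen : (pvRow l (c+1) (min (n-(c+1)) (j+1))).length = min (n-(c+1)) (j+1) := by
        simp [pvRow]
      by_cases hbr : n ≤ c + j ∨ (pvRow l (c+1) (min (n-(c+1)) (j+1))).length ≤ j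
      · rw [if_pos hbr]
        apply stateS_ge
        rcases hbr with h | h
        · omega
        · rw [hlen] at h; omega
      · rw [if_neg hbr]
        have h1 : ¬ n ≤ c + j := fun h => hbr (Or.inl h)
        have h2 : ¬ (pvRow l (c+1) (min (n-(c+1)) (j+1))).length ≤ j := fun h => hbr (Or.inr h)
        rw [hlen] at h2
        have hcj : c + j + 2 ≤ n := by omega
        rw [getD_stateS l n j c c (by omega), if_neg (by omega : ¬ c < c)]
        have hmc : min (n-c) (j+1) = j+1 := by omega
        have hmc1 : min (n-(c+1)) (j+1) = j+1 := by omega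
        rw [hmc, hmc1, getD_pvRow l c (j+1) j (by omega),
            getD_pvRow l (c+1) (j+1) j (by omega), comb_cast l j c,
            ← pvRow_succ l c (j+1)]
        have hset : (stateS l n j c).set c (pvRow l c (j+1+1)) = stateS l n j (c+1) := by
          unfold stateS
          rw [map_range_set]
          apply List.map_congr_left
          intro k hk
          simp only [List.mem_range] at hk
          by_cases hkc : k = c
          · subst hkc
            rw [if_pos rfl, if_pos (by omega : k < k + 1)]
            congr 1
            omega
          · rw [if_neg hkc]
            congr 1
            split_ifs <;> omega
        rw [hset]
        exact ih (c+1) (by omega)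

lemma stateT_eq_stateS_zero (l : List Int) (n j : Nat) :
    stateT l n j = stateS l n j 0 := by
  apply List.map_congr_left
  intro i _
  rw [if_neg (Nat.not_lt_zero i)]

lemma outer_go (l : List Int) (n : Nat) : ∀ (t c : Nat),
    outerA l n (stateT l n c) (List.range' c t) = stateT l n (c+t) := by
  intro t
  induction t with
  | zero => intro c; simp [outerA]
  | succ t ih =>
      intro c
      rw [List.range'_succ]
      simp only [outerA]
      rw [List.range_eq_range', stateT_eq_stateS_zero l n c,
          inner_go l n c (n-1) 0 (by omega), ih (c+1)]
      congr 1
      omega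

lemma init_go (_l : List Int) (n : Nat) : ∀ (t c : Nat), c + t ≤ n →
    initA ((List.range n).map (fun i => if i < c then [(i : Int)] else []))
        (List.range' c t)
      = (List.range n).map (fun i => if i < c+t then [(i : Int)] else []) := by
  intro t
  induction t with
  | zero => intro c _; simp [initA]
  | succ t ih =>
      intro c hc
      rw [List.range'_succ]
      simp only [initA]
      rw [PySem.List.getD_map_range _ n c _ (by omega), if_neg (by omega : ¬ c < c)]
      have hset : ((List.range n).map (fun i => if i < c then [(i : Int)] else [])).set c
            ([] ++ [(c : Int)])
          = (List.range n).map (fun i => if i < c+1 then [(i : Int)] else []) := by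
        rw [map_range_set]
        apply List.map_congr_left
        intro k hk
        by_cases hkc : k = c
        · subst hkc; simp
        · rw [if_neg hkc]
          split_ifs <;> first | rfl | omega
      rw [hset, show c + (t+1) = c+1+t from by omega]
      exact ih (c+1) (by omega)

-- ===== VERDICT (by name: the statement is the Claim_ definition above) =====
theorem full_table_spec : Claim_equal_full_table := by
  intro l _
  unfold Spec_full_table full_table full_table_alt
  set n := l.length with hn
  have h0 : (List.range n).map (fun _ => ([] : List Int))
      = (List.range n).map (fun (i : Nat) => if i < 0 then [(i : Int)] else []) := by
    apply List.map_congr_left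
    intro i _
    rw [if_neg (Nat.not_lt_zero i)]
  have s1 := init_go l n n 0 (by omega)
  have s2 := outer_go l n n 0
  have hT0 : (List.range n).map (fun i => if i < 0 + n then [(i : Int)] else [])
      = stateT l n 0 := by
    unfold stateT
    apply List.map_congr_left
    intro i hi
    simp only [List.mem_range] at hi
    rw [if_pos (by omega : i < 0 + n)]
    have hm : min (n-i) (0+1) = 1 := by omega
    rw [hm]
    simp [pvRow, List.range_succ, pvM]
  have hTn : stateT l n (0+n)
      = (List.range n).map (fun (i : Nat) => altRow l (i : Int) (PySem.List.pyRange (i : Int) (n : Int) 1)) := by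
    unfold stateT
    apply List.map_congr_left
    intro i hi
    simp only [List.mem_range] at hi
    rw [altRow_full l i n hi]
    congr 1
    omega
  simp only [List.range_eq_range'] at h0 s1 s2 hT0 hTn ⊢
  rw [h0, s1, hT0, s2, hTn]
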